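-- pv_equiv track=rewrite | github.com/koffer9/NLP | 20181209/20181209_CommentPickup.py | get_subject3
-- ===== SOURCE A (Python) =====
-- def get_subject3(word,flag,k): #往前找标点，再往后找名词
--     start=0
--     for i in range(k-1, -1, -1):
--         if flag[i] in ['w', 'x']:
--             start=i+1
--             break
--     for i in range(start,k,1):
--         if flag[i] in Gn: return word[i]
--     return 'unknown'
--
-- Gn=['n','nr','ns','nt','nz','nrt','Gn','x_n','comb'] #凡是连续出现这类词性，合并为'Gn'名词串
-- ===== SOURCE B (Python) =====
-- Gn=['n','nr','ns','nt','nz','nrt','Gn','x_n','comb']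
--
-- def get_subject3(word, flag, k):
--     # single forward pass: keep the first noun of the current segment
--     result = 'unknown'
--     found = False
--     for i in range(k):
--         if flag[i] in ['w', 'x']:
--             result = 'unknown'
--             found = False
--         elif not found and flag[i] in Gn:
--             result = word[i]
--             found = True
--     return result
-- ===== Notes on version B (the rewrite author's own statement) =====
-- stated objective: simpler
-- what changed: replaces A's backward scan for the last punctuation followed by a second forward scan with one left-to-right pass that keeps the first noun of the current segment and resets at punctuation
-- outside the precondition, e.g. on get_subject3([], ['n', 'w'], 2): A returns 'unknown', B raises IndexError
import Mathlib
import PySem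

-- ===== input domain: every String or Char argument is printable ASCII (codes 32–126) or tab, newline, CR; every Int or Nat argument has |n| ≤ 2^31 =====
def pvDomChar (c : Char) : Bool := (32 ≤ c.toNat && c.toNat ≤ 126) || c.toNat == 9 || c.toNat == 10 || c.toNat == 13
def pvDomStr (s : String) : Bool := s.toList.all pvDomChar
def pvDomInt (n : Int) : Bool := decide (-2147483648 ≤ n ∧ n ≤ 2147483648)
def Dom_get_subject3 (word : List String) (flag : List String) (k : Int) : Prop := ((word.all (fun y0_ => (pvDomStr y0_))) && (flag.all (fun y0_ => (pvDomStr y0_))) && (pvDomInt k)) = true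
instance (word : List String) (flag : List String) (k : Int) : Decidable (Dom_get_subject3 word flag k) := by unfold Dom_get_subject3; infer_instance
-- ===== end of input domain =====

-- B replaces A's backward-then-forward double scan by one forward pass keeping the
-- first noun of the current segment (objective: simpler); same return value on Pre_.

-- ===== PORT A =====
def pvGn : List String := ["n", "nr", "ns", "nt", "nz", "nrt", "Gn", "x_n", "comb"]

-- backward loop 'for i in range(k-1,-1,-1): if flag[i] in [w,x]: start=i+1; break'
-- transliterated as structural recursion on the count of remaining indices;
-- flag[i] is PySem.List.pyGetD (in range on Pre_).
def pvStartA (flag : List String) : Nat → Nat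
  | 0 => 0
  | m + 1 => if ["w", "x"].contains (PySem.List.pyGetD flag (m : Int) "") then m + 1 else pvStartA flag m

-- forward loop 'for i in range(start,k): if flag[i] in Gn: return word[i]'
def pvScanA (word flag : List String) : List Nat → String
  | [] => "unknown"
  | i :: rest =>
    if pvGn.contains (PySem.List.pyGetD flag (i : Int) "") then PySem.List.pyGetD word (i : Int) ""
    else pvScanA word flag rest

def get_subject3 (word : List String) (flag : List String) (k : Int) : String :=
  let start := pvStartA flag k.toNat
  pvScanA word flag (List.range' start (k.toNat - start))

-- ===== PORT B =====
-- one forward pass: reset at 'w'/'x', record the first noun of the current segment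
def pvStepB (word flag : List String) (st : String × Bool) (i : Nat) : String × Bool :=
  if ["w", "x"].contains (PySem.List.pyGetD flag (i : Int) "") then ("unknown", false)
  else if !st.2 && pvGn.contains (PySem.List.pyGetD flag (i : Int) "") then
    (PySem.List.pyGetD word (i : Int) "", true)
  else st

def get_subject3_alt (word : List String) (flag : List String) (k : Int) : String :=
  ((List.range k.toNat).foldl (pvStepB word flag) ("unknown", false)).1

-- ===== PRECONDITION & SPEC =====
-- word and flag are parallel tag/word arrays: Pre_ excludes k beyond either list,
-- where A (k > len(flag), or word too short at the returned index) or the natural B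
-- (word too short at a recorded noun) raises IndexError.
def Pre_get_subject3 (word : List String) (flag : List String) (k : Int) : Prop :=
  k ≤ (flag.length : Int) ∧ k ≤ (word.length : Int)
instance (word : List String) (flag : List String) (k : Int) : Decidable (Pre_get_subject3 word flag k) := by unfold Pre_get_subject3; infer_instance
def pvWitness_get_subject3 : List String × List String × Int := (["a", "b"], ["w", "n"], 2)
def Spec_get_subject3 (word : List String) (flag : List String) (k : Int) (out : String) : Prop := out = get_subject3_alt word flag k
instance (word : List String) (flag : List String) (k : Int) (out : String) : Decidable (Spec_get_subject3 word flag k out) := by unfold Spec_get_subject3; infer_instance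

-- ===== CLAIM (what is proved, stated in full; the proofs are below) =====
def Claim_equal_get_subject3 : Prop := ∀ (word : List String) (flag : List String) (k : Int), Dom_get_subject3 word flag k → Pre_get_subject3 word flag k → Spec_get_subject3 word flag k (get_subject3 word flag k)

-- ===== LEMMAS AND PROOFS =====

-- abbreviations for the two Bool tests both programs perform at index i
def pvWx (flag : List String) (i : Nat) : Bool :=
  ["w", "x"].contains (PySem.List.pyGetD flag (i : Int) "")
def pvNoun (flag : List String) (i : Nat) : Bool :=
  pvGn.contains (PySem.List.pyGetD flag (i : Int) "")

theorem pvStartA_succ (flag : List String) (m : Nat) :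
    pvStartA flag (m + 1) = if pvWx flag m then m + 1 else pvStartA flag m := rfl

theorem pvStepB_eq (word flag : List String) (st : String × Bool) (i : Nat) :
    pvStepB word flag st i =
      if pvWx flag i then ("unknown", false)
      else if !st.2 && pvNoun flag i then (PySem.List.pyGetD word (i : Int) "", true)
      else st := rfl

theorem pvStartA_le (flag : List String) : ∀ n, pvStartA flag n ≤ n := by
  intro n
  induction n with
  | zero => simp [pvStartA]
  | succ m ih => rw [pvStartA_succ]; split <;> omega

-- A's forward scan returns the word at the first Gn-flagged index, else "unknown"
theorem pvScanA_eq_find (word flag : List String) (idxs : List Nat) :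
    pvScanA word flag idxs =
      match idxs.find? (pvNoun flag) with
      | some i => PySem.List.pyGetD word (i : Int) ""
      | none => "unknown" := by
  induction idxs with
  | nil => rfl
  | cons i rest ih =>
    show (if pvNoun flag i then PySem.List.pyGetD word (i : Int) "" else pvScanA word flag rest) = _
    rw [List.find?_cons, ih]
    by_cases h : pvNoun flag i = true
    · rw [if_pos h, h]
    · rw [if_neg h, Bool.not_eq_true] at *
      rw [h]

-- invariant of B's fold: its state is (first noun of the current segment, found?)
theorem pvFoldB_eq (word flag : List String) : ∀ n : Nat,
    (List.range n).foldl (pvStepB word flag) ("unknown", false) =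
      match (List.range' (pvStartA flag n) (n - pvStartA flag n)).find? (pvNoun flag) with
      | some i => (PySem.List.pyGetD word (i : Int) "", true)
      | none => ("unknown", false) := by
  intro n
  induction n with
  | zero => rfl
  | succ m ih =>
    rw [List.range_succ, List.foldl_append, ih]
    simp only [List.foldl_cons, List.foldl_nil]
    rw [pvStepB_eq, pvStartA_succ]
    by_cases hwx : pvWx flag m = true
    · rw [if_pos hwx, if_pos hwx]
      simp
    · rw [if_neg hwx, if_neg hwx]
      have hle := pvStartA_le flag m
      have hsplit : List.range' (pvStartA flag m) (m + 1 - pvStartA flag m) =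
          List.range' (pvStartA flag m) (m - pvStartA flag m) ++ [m] := by
        have h1 : m + 1 - pvStartA flag m = (m - pvStartA flag m) + 1 := by omega
        rw [h1, List.range'_concat]
        congr 2
        omega
      rw [hsplit, List.find?_append]
      cases hfind : (List.range' (pvStartA flag m) (m - pvStartA flag m)).find? (pvNoun flag) with
      | some i => simp
      | none =>
        by_cases hn : pvNoun flag m = true <;> simp [List.find?, hn]

-- ===== VERDICT (by name: the statement is the Claim_ definition above) =====
theorem get_subject3_spec : Claim_equal_get_subject3 := by
  intro word flag k _ _
  unfold Spec_get_subject3 get_subject3 get_subject3_alt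
  rw [pvFoldB_eq, pvScanA_eq_find]
  cases (List.range' (pvStartA flag k.toNat) (k.toNat - pvStartA flag k.toNat)).find? (pvNoun flag) <;> rfl
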